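-- pv_equiv track=rewrite | github.com/Aiteta/AOC | 2023/day11.py | findExpandedGalaxies
-- ===== SOURCE A (Python) =====
-- def findEmptyRowsColumns(universe: list[str]) -> tuple[set[int], set[int]]:
--     rows = set()
--     cols = set()
--     transpose = lambda x: ["".join([x[i][j] for i in range(len(x))]) for j in range(len(x[0]))]
--     emptySpace = "." * len(universe[0])
--     for i in range(len(universe)):
--         if universe[i] == emptySpace:
--             rows.add(i)
--     universeT = transpose(universe)
--     emptySpace = "." * len(universeT[0])
--     for j in range(len(universeT)):
--         if universeT[j] == emptySpace:
--             cols.add(j)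
--     return rows, cols
--
-- def findExpandedGalaxies(universe: list[str], mult: int) -> list[tuple[int, int]]:
--     emptyRows, emptyCols = findEmptyRowsColumns(universe)
--     offsetX = 0
--     locs = list()
--     for i in range(len(universe)):
--         if i in emptyRows:
--             offsetX += 1
--         offsetY = 0
--         for j in range(len(universe[i])):
--             if j in emptyCols:
--                 offsetY += 1
--             if universe[i][j] == "#":
--                 locs.append((i + offsetX*mult,j + offsetY*mult))
--     return locs
-- ===== SOURCE B (Python) =====
-- def findExpandedGalaxies(universe: list[str], mult: int) -> list[tuple[int, int]]:
--     def emptyRow(r):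
--         return universe[r] == "." * len(universe[0])
--
--     def emptyCol(c):
--         return all(row[c] == "." for row in universe)
--
--     return [(i + mult * sum(map(emptyRow, range(i))),
--              j + mult * sum(map(emptyCol, range(j))))
--             for i, row in enumerate(universe)
--             for j, ch in enumerate(row) if ch == "#"]
-- ===== Notes on version B (the rewrite author's own statement) =====
-- stated objective: simpler
-- what changed: B drops A's transpose step, the two precomputed empty-index sets and the running offsetX/offsetY counters: it is a single stateless comprehension that, for each galaxy, counts the empty rows/columns before it directly; Pre_ excludes empty/zero-width grids and rows shorter than the first (A raises IndexError) and grids with a galaxy beyond the first row's width, where A's column offset freezes at that width as an artefact of its width-of-row-0 transpose while B raises.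
-- outside the precondition, e.g. on findExpandedGalaxies(['..', '..x#'], 1): A returns [(2, 5)], B raises IndexError
import Mathlib
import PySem

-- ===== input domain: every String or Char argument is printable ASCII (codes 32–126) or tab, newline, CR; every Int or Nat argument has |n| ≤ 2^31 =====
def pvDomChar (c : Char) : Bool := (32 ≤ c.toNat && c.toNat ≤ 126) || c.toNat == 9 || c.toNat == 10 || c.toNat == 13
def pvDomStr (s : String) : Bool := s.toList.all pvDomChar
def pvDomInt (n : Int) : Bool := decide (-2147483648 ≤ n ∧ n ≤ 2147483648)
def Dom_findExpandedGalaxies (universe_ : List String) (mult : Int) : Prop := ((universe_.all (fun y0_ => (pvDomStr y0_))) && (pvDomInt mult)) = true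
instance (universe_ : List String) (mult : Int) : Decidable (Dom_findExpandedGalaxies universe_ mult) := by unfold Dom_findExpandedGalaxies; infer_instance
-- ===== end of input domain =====

-- B replaces A's transpose, empty-index sets and running offset counters by one stateless
-- comprehension that counts empty rows/columns before each galaxy directly (simpler, no speed claim).
-- ===== PORT A =====
-- transpose = lambda x: ["".join([x[i][j] for i in range(len(x))]) for j in range(len(x[0]))]
def pvTransposeA (x : List (List Char)) : List (List Char) :=
  (PySem.List.pyRange 0 ((PySem.List.pyGetD x 0 []).length : Int) 1).map (fun j =>
    (PySem.List.pyRange 0 (x.length : Int) 1).map (fun i =>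
      PySem.List.pyGetD (PySem.List.pyGetD x i []) j ' '))

-- findEmptyRowsColumns(universe) : (set of empty row indices, set of empty col indices)
def pvFindEmptyRowsColumnsA (u : List (List Char)) : PySem.Set Int × PySem.Set Int :=
  let emptySpace := PySem.List.pyRepeat ['.'] ((PySem.List.pyGetD u 0 []).length : Int)
  let rows := (PySem.List.pyRange 0 (u.length : Int) 1).foldl
    (fun s i => if PySem.List.pyGetD u i [] = emptySpace then PySem.Set.add s i else s)
    PySem.Set.empty
  let universeT := pvTransposeA u
  let emptySpace2 := PySem.List.pyRepeat ['.'] ((PySem.List.pyGetD universeT 0 []).length : Int)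
  let cols := (PySem.List.pyRange 0 (universeT.length : Int) 1).foldl
    (fun s j => if PySem.List.pyGetD universeT j [] = emptySpace2 then PySem.Set.add s j else s)
    PySem.Set.empty
  (rows, cols)

def findExpandedGalaxies (universe_ : List String) (mult : Int) : List (Int × Int) :=
  let u := universe_.map String.toList
  let ec := pvFindEmptyRowsColumnsA u
  ((PySem.List.pyRange 0 (u.length : Int) 1).foldl (fun st i =>
      let offsetX := if PySem.Set.contains ec.1 i then st.1 + 1 else st.1
      let inner := (PySem.List.pyRange 0 ((PySem.List.pyGetD u i []).length : Int) 1).foldl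
        (fun st2 j =>
          let offsetY := if PySem.Set.contains ec.2 j then st2.1 + 1 else st2.1
          let locs := if PySem.List.pyGetD (PySem.List.pyGetD u i []) j ' ' = '#'
            then st2.2 ++ [(i + offsetX * mult, j + offsetY * mult)] else st2.2
          (offsetY, locs))
        ((0 : Int), st.2)
      (offsetX, inner.2))
    ((0 : Int), ([] : List (Int × Int)))).2

-- ===== PORT B =====
-- universe[0] is ported as headD (exact under Pre_, which requires a nonempty grid);
-- row[c] is ported as pyGetD with a default (exact under Pre_, where c is always in range).
def findExpandedGalaxies_alt (universe_ : List String) (mult : Int) : List (Int × Int) :=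
  let u := universe_.map String.toList
  let emptyRow := fun (r : Int) => PySem.List.pyGetD u r [] == List.replicate (u.headD []).length '.'
  let emptyCol := fun (c : Int) => u.all (fun row => PySem.List.pyGetD row c ' ' == '.')
  (PySem.List.enumerate u 0).flatMap (fun p =>
    ((PySem.List.enumerate p.2 0).filter (fun q => q.2 == '#')).map (fun q =>
      (p.1 + mult * ((PySem.List.pyRange 0 p.1 1).countP emptyRow : Int),
       q.1 + mult * ((PySem.List.pyRange 0 q.1 1).countP emptyCol : Int))))

-- ===== PRECONDITION & SPEC =====
-- Pre_ excludes empty grids, zero-width grids and rows shorter than the first (A raises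
-- IndexError there), and grids with a galaxy beyond the first row's width, where A's column
-- offset freezes at that width — an artefact of its width-of-row-0 transpose — while B raises.
def Pre_findExpandedGalaxies (universe_ : List String) (mult : Int) : Prop :=
  universe_ ≠ [] ∧ 0 < (universe_.headD "").toList.length ∧
    universe_.all (fun r => decide ((universe_.headD "").toList.length ≤ r.toList.length) &&
      (r.toList.drop (universe_.headD "").toList.length).all (fun c => c != '#')) = true
instance (universe_ : List String) (mult : Int) : Decidable (Pre_findExpandedGalaxies universe_ mult) := by
  unfold Pre_findExpandedGalaxies; infer_instance
def pvWitness_findExpandedGalaxies : List String × Int := (["#.", ".."], 2)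
def Spec_findExpandedGalaxies (universe_ : List String) (mult : Int) (out : List (Int × Int)) : Prop := out = findExpandedGalaxies_alt universe_ mult
instance (universe_ : List String) (mult : Int) (out : List (Int × Int)) : Decidable (Spec_findExpandedGalaxies universe_ mult out) := by unfold Spec_findExpandedGalaxies; infer_instance

-- ===== CLAIM =====
def Claim_equal_findExpandedGalaxies : Prop := ∀ (universe_ : List String) (mult : Int), Dom_findExpandedGalaxies universe_ mult → Pre_findExpandedGalaxies universe_ mult → Spec_findExpandedGalaxies universe_ mult (findExpandedGalaxies universe_ mult)

-- ===== LEMMAS AND PROOFS =====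

-- count of P-hits among 0..m-1 (Int-valued)
def pvCnt (P : Int → Bool) (m : Nat) : Int := ((List.range m).countP (fun j => P ((j : Nat) : Int)) : Int)

-- the list a single row of A's main loop appends, in closed form
def pvIR (u : List (List Char)) (pC : Int → Bool) (mult : Int) (i ox : Int) : List (Int × Int) :=
  (List.range (PySem.List.pyGetD u i []).length).flatMap (fun k =>
    if PySem.List.pyGetD (PySem.List.pyGetD u i []) ((k : Nat) : Int) ' ' = '#'
    then [(i + ox * mult, ((k : Nat) : Int) + (0 + pvCnt pC (k + 1)) * mult)] else [])

theorem pvCnt_succ (P : Int → Bool) (m : Nat) :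
    pvCnt P (m + 1) = pvCnt P m + (if P ((m : Nat) : Int) then 1 else 0) := by
  simp [pvCnt, List.range_succ, List.countP_append, List.countP_cons]

theorem pvLoop {γ : Type} (P : Int → Bool) (g : Int → Int → List γ) (m : Nat) :
    ∀ (x0 : Int) (L : List γ),
    (PySem.List.pyRange 0 (m : Int) 1).foldl
      (fun st i => ((if P i then st.1 + 1 else st.1),
                    st.2 ++ g i (if P i then st.1 + 1 else st.1))) (x0, L)
    = (x0 + pvCnt P m, L ++ (List.range m).flatMap (fun k => g ((k : Nat) : Int) (x0 + pvCnt P (k + 1)))) := by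
  induction m with
  | zero =>
    intro x0 L
    rw [show ((0 : Nat) : Int) = 0 by rfl, PySem.List.pyRange_one_eq_nil le_rfl]
    simp [pvCnt]
  | succ m ih =>
    intro x0 L
    rw [show ((m + 1 : Nat) : Int) = (m : Int) + 1 by push_cast; ring,
        PySem.List.pyRange_one_succ_right (by positivity), List.foldl_append, ih]
    simp only [List.foldl_cons, List.foldl_nil]
    have hc := pvCnt_succ P m
    refine Prod.ext ?_ ?_
    · simp only []
      split_ifs with h <;> simp [hc, h] <;> ring
    · simp only []
      rw [List.range_succ, List.flatMap_append]
      have : g (m : Int) (if P (m : Int) then x0 + pvCnt P m + 1 else x0 + pvCnt P m)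
           = g (m : Int) (x0 + pvCnt P (m + 1)) := by
        split_ifs with h <;> simp [hc, h] <;> ring_nf
      simp [this, List.append_assoc]

theorem pvFlatMapIf {γ : Type} (l : List Nat) (p : Nat → Bool) (f : Nat → γ) :
    l.flatMap (fun j => if p j then [f j] else []) = (l.filter p).map f := by
  induction l with
  | nil => rfl
  | cons a t ih =>
    simp only [List.flatMap_cons, List.filter_cons]
    by_cases h : p a <;> simp [h, ih]

theorem pvRows_contains (u : List (List Char)) (t : Nat) :
    PySem.Set.contains (pvFindEmptyRowsColumnsA u).1 ((t : Nat) : Int) = true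
    ↔ (t < u.length ∧ u.getD t [] = List.replicate (PySem.List.pyGetD u 0 []).length '.') := by
  simp only [pvFindEmptyRowsColumnsA]
  rw [PySem.List.foldl_ite_eq_foldl_filter
        (p := fun i => PySem.List.pyGetD u i [] =
          PySem.List.pyRepeat ['.'] (((PySem.List.pyGetD u 0 []).length : Nat) : Int))
        (f := PySem.Set.add)]
  rw [show (PySem.Set.empty : PySem.Set Int) = ([] : PySem.Set Int) from rfl,
      ← PySem.Set.ofList_eq_foldl]
  rw [PySem.Set.contains_iff, PySem.Set.mem_ofList, List.mem_filter,
      PySem.List.mem_pyRange_one]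
  simp [PySem.List.pyRepeat_singleton]

theorem pvColF_eq_replicate (u : List (List Char)) (t : Nat) :
    List.map (fun i => PySem.List.pyGetD (PySem.List.pyGetD u i []) ((t : Nat) : Int) ' ')
        (PySem.List.pyRange 0 (u.length : Int) 1) = List.replicate u.length '.'
    ↔ ∀ r ∈ u, r.getD t ' ' = '.' := by
  rw [PySem.List.pyRange_zero_natCast, List.map_map, List.eq_replicate_iff]
  simp only [List.length_map, List.length_range, true_and, List.mem_map, List.mem_range,
    Function.comp]
  constructor
  · intro h r hr
    obtain ⟨i, hi, rfl⟩ := List.mem_iff_getElem.mp hr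
    have := h ((u.getD i []).getD t ' ') ⟨i, hi, by simp⟩
    rwa [List.getD_eq_getElem u [] hi] at this
  · rintro h b ⟨i, hi, rfl⟩
    simp only [PySem.List.pyGetD_natCast]
    rw [List.getD_eq_getElem u [] hi]
    exact h _ (List.getElem_mem hi)

theorem pvT_len (u : List (List Char)) :
    (pvTransposeA u).length = (PySem.List.pyGetD u 0 []).length := by
  simp [pvTransposeA, PySem.List.length_pyRange_one]

theorem pvT_get (u : List (List Char)) (t : Nat)
    (ht : t < (PySem.List.pyGetD u 0 []).length) :
    PySem.List.pyGetD (pvTransposeA u) ((t : Nat) : Int) []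
    = List.map (fun i => PySem.List.pyGetD (PySem.List.pyGetD u i []) ((t : Nat) : Int) ' ')
        (PySem.List.pyRange 0 (u.length : Int) 1) := by
  simp only [pvTransposeA]
  exact PySem.List.pyGetD_map_pyRange _ _ t _ ht

theorem pvCols_contains (u : List (List Char)) (hw : 0 < (PySem.List.pyGetD u 0 []).length)
    (t : Nat) :
    PySem.Set.contains (pvFindEmptyRowsColumnsA u).2 ((t : Nat) : Int) = true
    ↔ (t < (PySem.List.pyGetD u 0 []).length ∧ ∀ r ∈ u, r.getD t ' ' = '.') := by
  simp only [pvFindEmptyRowsColumnsA]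
  rw [PySem.List.foldl_ite_eq_foldl_filter
        (p := fun j => PySem.List.pyGetD (pvTransposeA u) j [] =
          PySem.List.pyRepeat ['.']
            (((PySem.List.pyGetD (pvTransposeA u) 0 []).length : Nat) : Int))
        (f := PySem.Set.add)]
  rw [show (PySem.Set.empty : PySem.Set Int) = ([] : PySem.Set Int) from rfl,
      ← PySem.Set.ofList_eq_foldl]
  rw [PySem.Set.contains_iff, PySem.Set.mem_ofList, List.mem_filter,
      PySem.List.mem_pyRange_one, pvT_len]
  have h0 := pvT_get u 0 hw
  rw [show ((0:Nat) : Int) = (0 : Int) from rfl] at h0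
  have hlen0 : (PySem.List.pyGetD (pvTransposeA u) 0 []).length = u.length := by
    rw [h0]; simp [PySem.List.length_pyRange_one]
  constructor
  · rintro ⟨⟨h0t, htw⟩, hcol⟩
    have htw' : t < (PySem.List.pyGetD u 0 []).length := by exact_mod_cast htw
    simp only [decide_eq_true_eq] at hcol
    rw [hlen0, pvT_get u t htw'] at hcol
    refine ⟨htw', (pvColF_eq_replicate u t).mp ?_⟩
    rw [PySem.List.pyRepeat_singleton, Int.toNat_natCast] at hcol
    exact hcol
  · rintro ⟨htw', hall⟩
    refine ⟨⟨by positivity, by exact_mod_cast htw'⟩, ?_⟩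
    simp only [decide_eq_true_eq]
    rw [hlen0, pvT_get u t htw', PySem.List.pyRepeat_singleton, Int.toNat_natCast]
    exact (pvColF_eq_replicate u t).mpr hall

theorem pvFlatMapIf' {γ : Type} (l : List Nat) (c : Nat → Prop) [DecidablePred c] (f : Nat → γ) :
    l.flatMap (fun j => if c j then [f j] else []) = (l.filter (fun j => decide (c j))).map f := by
  rw [← pvFlatMapIf l (fun j => decide (c j)) f]
  congr 1
  funext j
  split_ifs <;> simp_all

-- row k holds a galaxy at column j ⇒ row k is not an empty row
theorem pvRow_not_empty (u : List (List Char)) (k j : Nat) (W : Nat)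
    (hj : j < (u.getD k []).length) (hg : (u.getD k []).getD j ' ' = '#') :
    ¬ (u.getD k [] = List.replicate W '.') := by
  intro h
  rw [h] at hj hg
  rw [List.length_replicate] at hj
  rw [List.getD_replicate _ hj] at hg
  exact absurd hg (by decide)

-- A's running row offset at a galaxy row = B's direct count of empty rows before it
theorem pvE1 (u : List (List Char)) (k j : Nat) (hk : k < u.length)
    (hj : j < (u.getD k []).length) (hg : (u.getD k []).getD j ' ' = '#') :
    pvCnt (fun i => PySem.Set.contains (pvFindEmptyRowsColumnsA u).1 i) (k + 1)
    = (((List.range k).countP (fun t =>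
        u.getD t [] == List.replicate (PySem.List.pyGetD u 0 []).length '.')) : Int) := by
  unfold pvCnt
  have hq : ∀ t ∈ List.range (k + 1),
      (PySem.Set.contains (pvFindEmptyRowsColumnsA u).1 ((t : Nat) : Int) = true)
      ↔ ((u.getD t [] == List.replicate (PySem.List.pyGetD u 0 []).length '.') = true) := by
    intro t ht
    rw [List.mem_range] at ht
    rw [pvRows_contains, beq_iff_eq]
    have htn : t < u.length := by omega
    simp [htn]
  rw [List.countP_congr hq]
  rw [List.range_succ, List.countP_append]
  have h1 : List.countP (fun t => u.getD t [] == List.replicate (PySem.List.pyGetD u 0 []).length '.') [k] = 0 := by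
    have hne := pvRow_not_empty u k j (PySem.List.pyGetD u 0 []).length hj hg
    simp only [List.countP_cons, List.countP_nil, Nat.zero_add]
    rw [beq_eq_false_iff_ne.mpr hne]
    decide
  rw [h1]
  simp

-- A's running column offset at a galaxy column = B's direct count of empty columns before it
-- (needs the grid rectangular, so that every scanned column index is below the width)
theorem pvE2 (u : List (List Char)) (hw : 0 < (PySem.List.pyGetD u 0 []).length)
    (k j : Nat) (hk : k < u.length) (hjw : j < (PySem.List.pyGetD u 0 []).length)
    (hj : j < (u.getD k []).length) (hg : (u.getD k []).getD j ' ' = '#') :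
    pvCnt (fun c => PySem.Set.contains (pvFindEmptyRowsColumnsA u).2 c) (j + 1)
    = (((List.range j).countP (fun t =>
        u.all (fun row => row.getD t ' ' == '.'))) : Int) := by
  have hrowmem : u.getD k [] ∈ u := by
    rw [List.getD_eq_getElem u [] hk]; exact List.getElem_mem hk
  unfold pvCnt
  have hq : ∀ t ∈ List.range (j + 1), t < j →
      ((PySem.Set.contains (pvFindEmptyRowsColumnsA u).2 ((t : Nat) : Int) = true)
      ↔ ((u.all (fun row => row.getD t ' ' == '.')) = true)) := by
    intro t _ htj
    rw [pvCols_contains u hw, List.all_eq_true]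
    simp only [beq_iff_eq]
    constructor
    · rintro ⟨_, hall⟩; exact hall
    · intro hall; exact ⟨by omega, hall⟩
  rw [List.range_succ, List.countP_append]
  have hgal_false : PySem.Set.contains (pvFindEmptyRowsColumnsA u).2 ((j : Nat) : Int) = false := by
    rw [← Bool.not_eq_true, pvCols_contains u hw]
    rintro ⟨_, hall⟩
    have := hall _ hrowmem
    rw [List.getD_eq_getElem _ ' ' hj] at hg this
    rw [this] at hg
    exact absurd hg (by decide)
  have h1 : List.countP (fun t => PySem.Set.contains (pvFindEmptyRowsColumnsA u).2 ((t : Nat) : Int)) [j] = 0 := by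
    simp only [List.countP_cons, List.countP_nil, Nat.zero_add, hgal_false]
    rfl
  rw [h1]
  have h3 : List.countP (fun t => PySem.Set.contains (pvFindEmptyRowsColumnsA u).2 ((t : Nat) : Int)) (List.range j)
      = List.countP (fun t => u.all (fun row => row.getD t ' ' == '.')) (List.range j) := by
    apply List.countP_congr
    intro t ht
    have htj := List.mem_range.mp ht
    exact hq t (List.mem_range.mpr (by omega)) htj
  rw [h3]
  simp

theorem pvA_closed (u : List (List Char)) (pR pC : Int → Bool) (mult : Int) :
    ((PySem.List.pyRange 0 (u.length : Int) 1).foldl (fun st i =>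
        ((if pR i then st.1 + 1 else st.1),
         ((PySem.List.pyRange 0 ((PySem.List.pyGetD u i []).length : Int) 1).foldl
           (fun st2 j =>
             ((if pC j then st2.1 + 1 else st2.1),
              (if PySem.List.pyGetD (PySem.List.pyGetD u i []) j ' ' = '#'
               then st2.2 ++ [(i + (if pR i then st.1 + 1 else st.1) * mult,
                               j + (if pC j then st2.1 + 1 else st2.1) * mult)]
               else st2.2)))
           ((0 : Int), st.2)).2))
      ((0 : Int), ([] : List (Int × Int)))).2
    = (List.range u.length).flatMap (fun k =>
        pvIR u pC mult ((k : Nat) : Int) (0 + pvCnt pR (k + 1))) := by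
  have hfun : (fun (st : Int × List (Int × Int)) (i : Int) =>
      ((if pR i then st.1 + 1 else st.1),
       ((PySem.List.pyRange 0 ((PySem.List.pyGetD u i []).length : Int) 1).foldl
         (fun st2 j =>
           ((if pC j then st2.1 + 1 else st2.1),
            (if PySem.List.pyGetD (PySem.List.pyGetD u i []) j ' ' = '#'
             then st2.2 ++ [(i + (if pR i then st.1 + 1 else st.1) * mult,
                             j + (if pC j then st2.1 + 1 else st2.1) * mult)]
             else st2.2)))
         ((0 : Int), st.2)).2))
      = (fun st i =>
        ((if pR i then st.1 + 1 else st.1),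
         st.2 ++ pvIR u pC mult i (if pR i then st.1 + 1 else st.1))) := by
    funext st i
    have hin : (fun (st2 : Int × List (Int × Int)) (j : Int) =>
        ((if pC j then st2.1 + 1 else st2.1),
         (if PySem.List.pyGetD (PySem.List.pyGetD u i []) j ' ' = '#'
          then st2.2 ++ [(i + (if pR i then st.1 + 1 else st.1) * mult,
                          j + (if pC j then st2.1 + 1 else st2.1) * mult)]
          else st2.2)))
        = (fun st2 j =>
          ((if pC j then st2.1 + 1 else st2.1),
           st2.2 ++ (if PySem.List.pyGetD (PySem.List.pyGetD u i []) j ' ' = '#'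
             then [(i + (if pR i then st.1 + 1 else st.1) * mult,
                    j + (if pC j then st2.1 + 1 else st2.1) * mult)]
             else []))) := by
      funext st2 j
      by_cases h : PySem.List.pyGetD (PySem.List.pyGetD u i []) j ' ' = '#' <;> simp [h]
    rw [hin, pvLoop pC
        (fun j y => if PySem.List.pyGetD (PySem.List.pyGetD u i []) j ' ' = '#'
          then [(i + (if pR i then st.1 + 1 else st.1) * mult, j + y * mult)] else [])
        (PySem.List.pyGetD u i []).length 0 st.2]
    simp [pvIR]
  rw [hfun, pvLoop pR (fun i ox => pvIR u pC mult i ox) u.length 0 []]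
  simp

-- B's Int-indexed count over pyRange 0 n = the Nat-indexed countP over range n
theorem pvCountRange (P : Int → Bool) (n : Nat) :
    (PySem.List.pyRange 0 ((n : Nat) : Int) 1).countP P
    = (List.range n).countP (fun t => P ((t : Nat) : Int)) := by
  rw [PySem.List.pyRange_zero_natCast, List.countP_map]
  rfl

-- ===== VERDICT =====
theorem findExpandedGalaxies_spec : Claim_equal_findExpandedGalaxies := by
  intro universe_ mult _hdom hpre
  unfold Spec_findExpandedGalaxies
  obtain ⟨hne, hwlen, hrows⟩ := hpre
  simp only [findExpandedGalaxies, findExpandedGalaxies_alt]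
  set u := universe_.map String.toList with hu
  have hHead : u.headD [] = PySem.List.pyGetD u 0 [] := by
    rw [PySem.List.pyGetD_zero]; cases u <;> simp
  have hHead2 : u.headD [] = (universe_.headD "").toList := by
    rw [hu]; cases universe_ <;> simp
  have hw : 0 < (PySem.List.pyGetD u 0 []).length := by
    rw [← hHead, hHead2]; exact hwlen
  have hpre2 : ∀ r ∈ u, (PySem.List.pyGetD u 0 []).length ≤ r.length ∧
      ∀ c ∈ r.drop (PySem.List.pyGetD u 0 []).length, c ≠ '#' := by
    intro r hr
    rw [hu] at hr
    obtain ⟨s, hs, rfl⟩ := List.mem_map.mp hr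
    have h := List.all_eq_true.mp hrows s hs
    rw [Bool.and_eq_true, decide_eq_true_eq] at h
    rw [← hHead, hHead2]
    refine ⟨h.1, ?_⟩
    intro c hc
    have := List.all_eq_true.mp h.2 c hc
    simpa [bne_iff_ne] using this
  rw [pvA_closed u (fun i => PySem.Set.contains (pvFindEmptyRowsColumnsA u).1 i)
        (fun j => PySem.Set.contains (pvFindEmptyRowsColumnsA u).2 j) mult]
  rw [PySem.List.enumerate_eq_map_pyRange u []]
  rw [List.flatMap_map]
  rw [show PySem.List.len u = (u.length : Int) from by simp [PySem.List.len]]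
  rw [PySem.List.pyRange_zero_natCast, List.flatMap_map]
  rw [List.flatMap_def, List.flatMap_def]
  congr 1
  apply List.map_congr_left
  intro k hk
  rw [List.mem_range] at hk
  dsimp only
  rw [pvCountRange]
  simp only [pvIR, PySem.List.pyGetD_natCast]
  rw [pvFlatMapIf' (List.range (u.getD k []).length)
      (fun j => (u.getD k []).getD j ' ' = '#')]
  rw [PySem.List.enumerate_eq_map_pyRange (u.getD k []) ' ']
  rw [show PySem.List.len (u.getD k []) = ((u.getD k []).length : Int) from by simp [PySem.List.len]]
  rw [PySem.List.pyRange_zero_natCast, List.filter_map, List.filter_map,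
      List.map_map, List.map_map]
  rw [List.filter_congr (l := List.range (u.getD k []).length)
      (p := ((fun (q : Int × Char) => q.2 == '#') ∘
              (fun j => (j, PySem.List.pyGetD (u.getD k []) j ' '))) ∘ (fun (k' : Nat) => ((k' : Nat) : Int)))
      (q := fun j => decide ((u.getD k []).getD j ' ' = '#'))
      (by intro a _
          rw [Bool.eq_iff_iff]
          simp [Function.comp, beq_iff_eq])]
  apply List.map_congr_left
  intro j hjf
  rw [List.mem_filter, List.mem_range, decide_eq_true_eq] at hjf
  obtain ⟨hj, hgal⟩ := hjf
  simp only [Function.comp_apply]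
  refine Prod.ext ?_ ?_
  · dsimp only
    rw [hHead, ← pvE1 u k j hk hj hgal]
    ring
  · dsimp only
    rw [pvCountRange]
    have hcp : (List.range j).countP
        (fun t => u.all (fun row => PySem.List.pyGetD row ((t : Nat) : Int) ' ' == '.'))
        = (List.range j).countP (fun t => u.all (fun row => row.getD t ' ' == '.')) := by
      apply List.countP_congr
      intro t _
      simp [PySem.List.pyGetD_natCast]
    have hjw : j < (PySem.List.pyGetD u 0 []).length := by
      have hmem : u.getD k [] ∈ u := by
        rw [List.getD_eq_getElem u [] hk]; exact List.getElem_mem hk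
      obtain ⟨hlen, hdrop⟩ := hpre2 _ hmem
      by_contra hcon
      push_neg at hcon
      refine hdrop ((u.getD k []).getD j ' ') ?_ hgal
      rw [List.getD_eq_getElem _ ' ' hj]
      refine List.mem_iff_getElem.mpr ⟨j - (PySem.List.pyGetD u 0 []).length, ?_, ?_⟩
      · rw [List.length_drop]; omega
      · rw [List.getElem_drop]; congr 1; omega
    rw [hcp, ← pvE2 u hw k j hk hjw hj hgal]
    ring
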